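-- pv_equiv track=rewrite | github.com/TUrielRios/PDF-AI | utils/text_utils.py | extract_summary_text
-- ===== SOURCE A (Python) =====
-- def extract_summary_text(text, max_length=1000):
--     """Extract a shorter version of text for summarization"""
--     if len(text) <= max_length:
--         return text
--
--     # Split into paragraphs
--     paragraphs = text.split('\n\n')
--
--     # Take first paragraph
--     result = paragraphs[0]
--
--     # Add more paragraphs until we reach max_length
--     for p in paragraphs[1:]:
--         if len(result) + len(p) + 2 <= max_length:  # +2 for the newlines
--             result += '\n\n' + p
--         else:
--             break
--
--     return result
-- ===== SOURCE B (Python) =====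
-- def extract_summary_text(text, max_length=1000):
--     """Extract a shorter version of text for summarization"""
--     if len(text) <= max_length:
--         return text
--
--     paragraphs = text.split('\n\n')
--
--     # cum[i] = len('\n\n'.join(paragraphs[:i+1])); strictly increasing
--     cum = []
--     total = -2
--     for p in paragraphs:
--         total += len(p) + 2
--         cum.append(total)
--
--     # largest k with cum[k] <= max_length, clamped to 0 so the
--     # first paragraph is always kept
--     k = len(paragraphs) - 1
--     while k > 0 and cum[k] > max_length:
--         k -= 1
--
--     return '\n\n'.join(paragraphs[:k + 1])
-- ===== Notes on version B (the rewrite author's own statement) =====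
-- stated objective: alternative
-- what changed: A grows the result by repeated string concatenation, testing its length each step; B builds a prefix-sum array of paragraph lengths (+2 per separator), scans backward for the largest prefix that fits (clamped so the first paragraph is always kept), and joins that prefix once.
import Mathlib
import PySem

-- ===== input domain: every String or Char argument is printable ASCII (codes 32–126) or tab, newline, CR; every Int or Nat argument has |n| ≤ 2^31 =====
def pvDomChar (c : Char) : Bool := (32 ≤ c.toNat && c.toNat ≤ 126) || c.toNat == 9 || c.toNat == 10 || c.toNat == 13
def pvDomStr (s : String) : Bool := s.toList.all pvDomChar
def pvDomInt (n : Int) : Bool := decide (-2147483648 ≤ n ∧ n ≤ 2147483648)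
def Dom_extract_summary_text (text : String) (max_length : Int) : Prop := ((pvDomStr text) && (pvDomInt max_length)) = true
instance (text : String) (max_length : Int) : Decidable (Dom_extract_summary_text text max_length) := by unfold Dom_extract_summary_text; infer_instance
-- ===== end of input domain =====

-- B replaces A's grow-and-test string concatenation by a prefix-sum array of paragraph
-- lengths, a backward search for the largest fitting prefix, and a single join (alternative
-- decomposition; same behaviour on every input).

-- ===== PORT A =====
-- the 'for p in paragraphs[1:]: …' loop of A, with its break
def pvALoop (maxl : Int) (result : List Char) : List (List Char) → List Char
  | [] => result
  | p :: ps =>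
    if PySem.List.len result + PySem.List.len p + 2 ≤ maxl then
      pvALoop maxl (result ++ '\n' :: '\n' :: p) ps
    else result

def extract_summary_text (text : String) (max_length : Int) : String :=
  if PySem.List.len text.toList ≤ max_length then text
  else
    match PySem.Chars.splitOn text.toList ['\n', '\n'] with
    | [] => ""   -- unreachable: split of any string is nonempty (paragraphs[0] never raises)
    | p0 :: rest => String.mk (pvALoop max_length p0 rest)

-- ===== PORT B =====
-- the 'for p in paragraphs: total += len(p) + 2; cum.append(total)' loop of B
def pvBCum : List (List Char) → Int → List Int
  | [], _ => []
  | p :: ps, total =>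
    (total + PySem.List.len p + 2) :: pvBCum ps (total + PySem.List.len p + 2)

-- the 'while k > 0 and cum[k] > max_length: k -= 1' loop of B
def pvBFind (cum : List Int) (maxl : Int) (k : Int) : Int :=
  if h : 0 < k ∧ maxl < PySem.List.pyGetD cum k 0 then pvBFind cum maxl (k - 1) else k
termination_by k.toNat
decreasing_by omega

def extract_summary_text_alt (text : String) (max_length : Int) : String :=
  if PySem.List.len text.toList ≤ max_length then text
  else
    let paragraphs := PySem.Chars.splitOn text.toList ['\n', '\n']
    let cum := pvBCum paragraphs (-2)
    let k := pvBFind cum max_length (PySem.List.len paragraphs - 1)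
    String.mk (PySem.Chars.join ['\n', '\n'] (PySem.List.slice paragraphs none (some (k + 1))))

-- ===== PRECONDITION & SPEC =====
def Spec_extract_summary_text (text : String) (max_length : Int) (out : String) : Prop := out = extract_summary_text_alt text max_length
instance (text : String) (max_length : Int) (out : String) : Decidable (Spec_extract_summary_text text max_length out) := by unfold Spec_extract_summary_text; infer_instance

-- ===== CLAIM (what is proved, stated in full; the proofs are below) =====
def Claim_equal_extract_summary_text : Prop := ∀ (text : String) (max_length : Int), Dom_extract_summary_text text max_length → Spec_extract_summary_text text max_length (extract_summary_text text max_length)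

-- ===== LEMMAS AND PROOFS =====

-- greedy count: how many leading entries of a cumulative-length list fit under maxl
def pvT (maxl : Int) : List Int → Nat
  | [] => 0
  | x :: xs => if x ≤ maxl then pvT maxl xs + 1 else 0

theorem pvBCum_length (ps : List (List Char)) (t : Int) : (pvBCum ps t).length = ps.length := by
  induction ps generalizing t with
  | nil => rfl
  | cons p ps ih => simp [pvBCum, ih]

theorem pvBCum_lb (ps : List (List Char)) (t : Int) (x : Int) (hx : x ∈ pvBCum ps t) : t < x := by
  induction ps generalizing t with
  | nil => simp [pvBCum] at hx
  | cons p ps ih =>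
    simp only [pvBCum, List.mem_cons] at hx
    rcases hx with h | h
    · have : (0:Int) ≤ PySem.List.len p := by simp [PySem.List.len_eq]
      omega
    · have h1 := ih (t + PySem.List.len p + 2) h
      have : (0:Int) ≤ PySem.List.len p := by simp [PySem.List.len_eq]
      omega

theorem pvT_le (maxl : Int) (xs : List Int) : pvT maxl xs ≤ xs.length := by
  induction xs with
  | nil => simp [pvT]
  | cons x xs ih => simp only [pvT]; split <;> simp <;> omega

theorem pvT_below (maxl : Int) (xs : List Int) (j : Nat) (hj : j < pvT maxl xs) :
    xs.getD j 0 ≤ maxl := by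
  induction xs generalizing j with
  | nil => simp [pvT] at hj
  | cons x xs ih =>
    simp only [pvT] at hj
    split at hj
    · cases j with
      | zero => simpa
      | succ j' => simpa using ih j' (by omega)
    · omega

theorem pvT_above (maxl : Int) (ps : List (List Char)) (c0 : Int) (j : Nat)
    (h1 : pvT maxl (pvBCum ps c0) ≤ j) (h2 : j < (pvBCum ps c0).length) :
    maxl < (pvBCum ps c0).getD j 0 := by
  induction ps generalizing c0 j with
  | nil => simp [pvBCum] at h2
  | cons p ps ih =>
    simp only [pvBCum, PySem.List.len_eq] at h1 h2 ⊢
    by_cases hc : c0 + (p.length : Int) + 2 ≤ maxl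
    · rw [pvT, if_pos hc] at h1
      cases j with
      | zero => omega
      | succ j' =>
        simp only [List.getD_cons_succ]
        have := ih (c0 + (p.length : Int) + 2) j' (by omega) (by simpa using h2)
        simpa [PySem.List.len_eq] using this
    · push_neg at hc
      rw [pvT, if_neg (by omega)] at h1
      cases j with
      | zero => simpa using hc
      | succ j' =>
        simp only [List.getD_cons_succ]
        have hlen : j' < (pvBCum ps (c0 + (p.length : Int) + 2)).length := by simpa using h2
        have hmem : (pvBCum ps (c0 + (p.length : Int) + 2)).getD j' 0 ∈
            pvBCum ps (c0 + (p.length : Int) + 2) := by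
          rw [List.getD_eq_getElem _ _ hlen]; exact List.getElem_mem hlen
        have hlb := pvBCum_lb _ _ _ hmem
        simp only [PySem.List.len_eq] at hlb
        omega

theorem pvBFind_eq (c0 maxl : Int) (xs : List Int)
    (habove : ∀ j : Nat, pvT maxl xs ≤ j → j < xs.length → maxl < xs.getD j 0)
    (n : Nat) (hlo : pvT maxl xs ≤ n) (hhi : n ≤ xs.length) :
    pvBFind (c0 :: xs) maxl (n : Int) = (pvT maxl xs : Int) := by
  induction n with
  | zero =>
    rw [pvBFind, dif_neg (fun h => absurd h.1 (by norm_num))]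
    omega
  | succ n ih =>
    have hcast : ((n + 1 : Nat) : Int) = (n : Int) + 1 := by push_cast; ring
    have hget : PySem.List.pyGetD (c0 :: xs) ((n : Int) + 1) 0 = xs.getD n 0 := by
      rw [← hcast, PySem.List.pyGetD_natCast]; simp
    rw [hcast]
    by_cases hcase : pvT maxl xs ≤ n
    · rw [pvBFind, dif_pos ⟨by omega, by rw [hget]; exact habove n hcase (by omega)⟩]
      rw [show (n : Int) + 1 - 1 = (n : Int) by ring]
      exact ih hcase (by omega)
    · have htn : pvT maxl xs = n + 1 := by omega
      rw [pvBFind, dif_neg ?_]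
      · omega
      · rintro ⟨-, hgt⟩
        rw [hget] at hgt
        have := pvT_below maxl xs n (by omega)
        omega

theorem pvALoop_eq (maxl : Int) (ps : List (List Char)) (res : List Char) :
    pvALoop maxl res ps =
      PySem.Chars.join ['\n', '\n']
        (res :: ps.take (pvT maxl (pvBCum ps (res.length : Int)))) := by
  induction ps generalizing res with
  | nil => simp [pvALoop, pvBCum, pvT, PySem.Chars.join_singleton]
  | cons p ps ih =>
    simp only [pvALoop, pvBCum, pvT, PySem.List.len_eq]
    by_cases hc : (res.length : Int) + (p.length : Int) + 2 ≤ maxl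
    · rw [if_pos hc, if_pos hc, ih]
      have harg : ((res ++ '\n' :: '\n' :: p).length : Int) = (res.length : Int) + (p.length : Int) + 2 := by
        simp; push_cast; ring
      rw [harg]
      rw [List.take_succ_cons, PySem.Chars.join_cons_cons]
      rcases ht : ps.take (pvT maxl (pvBCum ps ((res.length : Int) + (p.length : Int) + 2))) with _ | ⟨q, l⟩
      · simp [PySem.Chars.join_singleton]
      · rw [PySem.Chars.join_cons_cons, PySem.Chars.join_cons_cons]
        simp
    · rw [if_neg hc, if_neg hc]
      simp [PySem.Chars.join_singleton]

-- ===== VERDICT (by name: the statement is the Claim_ definition above) =====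
theorem extract_summary_text_spec : Claim_equal_extract_summary_text := by
  intro text maxl _
  unfold Spec_extract_summary_text extract_summary_text extract_summary_text_alt
  by_cases hguard : PySem.List.len text.toList ≤ maxl
  · rw [if_pos hguard, if_pos hguard]
  · rw [if_neg hguard, if_neg hguard]
    rcases hP : PySem.Chars.splitOn text.toList ['\n', '\n'] with _ | ⟨p0, rest⟩
    · -- unreachable-in-Python empty-split case: both sides give ""
      simp only [pvBCum, PySem.List.len_eq, List.length_nil, Nat.cast_zero]
      rw [pvBFind, dif_neg (fun h => absurd h.1 (by norm_num))]
      rw [show (0 : Int) - 1 + 1 = 0 by ring]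
      rw [PySem.List.slice_to _ le_rfl]
      simp [PySem.Chars.join_nil]
      rfl
    · simp only [PySem.List.len_eq, pvBCum]
      rw [show (-2 : Int) + ((p0.length : Nat) : Int) + 2 = ((p0.length : Int)) by ring]
      have hlen1 : ((p0 :: rest).length : Int) - 1 = ((pvBCum rest (p0.length : Int)).length : Int) := by
        simp [pvBCum_length]
      rw [hlen1]
      set xs := pvBCum rest ((p0.length : Int)) with hxs
      set t := pvT maxl xs with ht
      have hk : pvBFind ((p0.length : Int) :: xs) maxl ((xs.length : Nat) : Int) = (t : Int) := by
        exact pvBFind_eq _ maxl xs (fun j h1 h2 => pvT_above maxl rest _ j h1 h2) xs.length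
          (pvT_le maxl xs) le_rfl
      rw [hk]
      have htle : t ≤ rest.length := by
        have := pvT_le maxl xs
        simpa [hxs, pvBCum_length] using this
      rw [show ((t : Int) + 1) = (((t + 1 : Nat)) : Int) by push_cast; ring]
      rw [PySem.List.slice_to _ (by positivity)]
      rw [Int.toNat_natCast, List.take_succ_cons]
      rw [pvALoop_eq maxl rest p0]
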